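-- pv_equiv track=rewrite | github.com/Martinaa1408/Computational_Method | Lanese/script/26.02_dict.py | check_reaction
-- ===== SOURCE A (Python) =====
-- def count_side(side):
--     counts = {}
--
--     for term in side.split("+"):
--         term = term.strip().replace(" ", "")
--         i = 0
--
--         coef = ""
--         while i < len(term) and term[i].isdigit():
--             coef += term[i]
--             i += 1
--         coef = int(coef) if coef else 1
--
--         formula = term[i:]
--         i = 0
--
--         while i < len(formula):
--             if formula[i].isupper():
--                 elem = formula[i]
--                 i += 1
--                 if i < len(formula) and formula[i].islower():
--                     elem += formula[i]
--                     i += 1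
--
--                 num = ""
--                 while i < len(formula) and formula[i].isdigit():
--                     num += formula[i]
--                     i += 1
--                 num = int(num) if num else 1
--
--                 counts[elem] = counts.get(elem, 0) + coef * num
--             else:
--                 i += 1
--
--     return counts
--
-- def check_reaction(line):
--     left, right = line.split("->")
--     left_counts = count_side(left)
--     right_counts = count_side(right)
--
--     balanced = left_counts == right_counts
--     diffs = {}
--
--     if not balanced:
--         all_elems = set(left_counts) | set(right_counts)
--         for e in all_elems:
--             r = left_counts.get(e, 0)
--             p = right_counts.get(e, 0)
--             if r != p:
--                 diffs[e] = (r, p, r - p)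
--
--     return balanced, diffs
-- ===== SOURCE B (Python) =====
-- def _add(counts, coef, elem, num):
--     counts[elem] = counts.get(elem, 0) + coef * int(num or "1")
--
--
-- def _count_side(side):
--     # single forward pass per term: a (symbol, digit-run) accumulator that is
--     # flushed whenever a new token starts or a separator character appears
--     counts = {}
--     for term in side.split("+"):
--         term = term.strip().replace(" ", "")
--         body = term.lstrip("0123456789")
--         coef = int(term[:len(term) - len(body)] or "1")
--         elem = num = ""
--         for c in body:
--             if c.isupper():
--                 if elem:
--                     _add(counts, coef, elem, num)
--                 elem, num = c, ""
--             elif c.islower() and len(elem) == 1 and not num: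
--                 elem += c
--             elif c.isdigit() and elem:
--                 num += c
--             else:
--                 if elem:
--                     _add(counts, coef, elem, num)
--                 elem, num = "", ""
--         if elem:
--             _add(counts, coef, elem, num)
--     return counts
--
--
-- def check_reaction(line):
--     left, right = line.split("->")
--     lc = _count_side(left)
--     rc = _count_side(right)
--     if lc == rc:
--         return True, {}
--     elems = list(dict.fromkeys(list(lc) + list(rc)))
--     diffs = {e: (lc.get(e, 0), rc.get(e, 0), lc.get(e, 0) - rc.get(e, 0))
--              for e in elems if lc.get(e, 0) != rc.get(e, 0)}
--     return False, diffs
-- ===== Notes on version B (the rewrite author's own statement) =====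
-- stated objective: alternative
-- what changed: count_side's three nested index-juggling while loops are replaced by a single forward pass per term with a pending (symbol, digit-run) accumulator that is flushed at token boundaries (plus lstrip for the coefficient), and the diffs loop by a dict comprehension over an ordered key union; Pre_ excludes only lines where the two-variable unpacking of the line on the arrow separator raises ValueError (the separator occurs zero or several times).
import Mathlib
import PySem

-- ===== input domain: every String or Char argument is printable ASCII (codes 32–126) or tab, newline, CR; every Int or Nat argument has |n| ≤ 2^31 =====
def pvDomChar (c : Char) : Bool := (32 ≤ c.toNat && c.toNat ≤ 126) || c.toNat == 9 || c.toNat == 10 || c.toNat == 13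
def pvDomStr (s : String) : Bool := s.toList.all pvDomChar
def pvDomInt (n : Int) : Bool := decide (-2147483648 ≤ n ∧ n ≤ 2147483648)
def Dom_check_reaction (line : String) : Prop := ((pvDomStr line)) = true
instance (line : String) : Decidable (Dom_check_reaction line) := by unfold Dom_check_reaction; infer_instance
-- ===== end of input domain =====

-- B replaces A's index-juggling parser (three nested while loops over positions) by a single
-- forward pass with a pending (symbol, digit-run) accumulator, and the diffs loop by a dict
-- comprehension over an ordered key union: alternative decomposition, same cost.

-- ===== PORT A =====
-- A's digit-scanning while-loop ("while i < len(..) and ..[i].isdigit(): acc += ..[i]"):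
-- returns the accumulated leading digit run together with the remaining characters
def aDigits : List Char → List Char × List Char
  | [] => ([], [])
  | c :: cs =>
    if PySem.Chars.isdigit c then
      let p := aDigits cs
      (c :: p.1, p.2)
    else ([], c :: cs)

theorem aDigits_snd_length_le (cs : List Char) : (aDigits cs).2.length ≤ cs.length := by
  induction cs with
  | nil => simp [aDigits]
  | cons c cs ih =>
    simp only [aDigits]
    split
    · simp; omega
    · simp

-- "int(s) if s else 1": int() on a pure digit run never raises, so getD's default is never used
def aInt (ds : List Char) : Int := if ds = [] then 1 else (PySem.Int.ofChars? ds).getD 1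

-- A's main while-loop over `formula`, with the advancing index rendered as recursion on the
-- not-yet-scanned suffix (the index only moves forward)
def aScan (coef : Int) : List Char → PySem.Dict String Int → PySem.Dict String Int
  | [], counts => counts
  | c :: cs, counts =>
    if PySem.Chars.isupper c then
      match cs with
      | d :: cs' =>
        if PySem.Chars.islower d then
          let p := aDigits cs'
          aScan coef p.2 (counts.insert (String.ofList [c, d]) (counts.getD (String.ofList [c, d]) 0 + coef * aInt p.1))
        else
          let p := aDigits (d :: cs')
          aScan coef p.2 (counts.insert (String.ofList [c]) (counts.getD (String.ofList [c]) 0 + coef * aInt p.1))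
      | [] => counts.insert (String.ofList [c]) (counts.getD (String.ofList [c]) 0 + coef * aInt [])
    else aScan coef cs counts
termination_by cs => cs.length
decreasing_by
  · have := aDigits_snd_length_le cs'; simp; omega
  · have := aDigits_snd_length_le (d :: cs'); simp at this ⊢; omega
  · simp

def aCountSide (side : List Char) : PySem.Dict String Int :=
  (PySem.Chars.splitOn side ['+']).foldl (fun counts term =>
    let term := PySem.Chars.replace (PySem.Chars.strip term) [' '] []
    let p := aDigits term          -- coef = leading digit run, formula = term[i:]
    aScan (aInt p.1) p.2 counts) PySem.Dict.empty

-- Python's built-in `dict == dict` (order-insensitive), used by both ports: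
-- same key set and same value at every key
def pyDictEq (d1 d2 : PySem.Dict String Int) : Bool :=
  PySem.Set.equal d1.keys d2.keys && d1.keys.all (fun k => d1.get? k == d2.get? k)

def check_reaction (line : String) : Bool × (List (String × Int × Int × Int)) :=
  match PySem.Chars.splitOn line.toList ('-' :: '>' :: []) with
  | [left, right] =>
    let lc := aCountSide left
    let rc := aCountSide right
    let balanced := pyDictEq lc rc
    let diffs : PySem.Dict String (Int × Int × Int) :=
      if balanced then PySem.Dict.empty
      else
        (PySem.Set.union (PySem.Set.ofList lc.keys) (PySem.Set.ofList rc.keys)).foldl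
          (fun diffs e =>
            let r := lc.getD e 0
            let p := rc.getD e 0
            if r != p then diffs.insert e (r, p, r - p) else diffs)
          PySem.Dict.empty
    (balanced, diffs.items)
  | _ => (false, [])   -- unreachable under Pre_: the two-variable unpacking of the split raises otherwise

-- ===== PORT B =====
-- "int(num or '1')"
def bInt (ds : List Char) : Int := if ds = [] then 1 else (PySem.Int.ofChars? ds).getD 1

-- `_add(counts, coef, elem, num)`
def bAdd (coef : Int) (counts : PySem.Dict String Int) (elem num : List Char) :
    PySem.Dict String Int :=
  counts.insert (String.ofList elem) (counts.getD (String.ofList elem) 0 + coef * bInt num)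

-- the body of `for c in body: ...` — one step of the forward accumulator
def bStep (coef : Int) (st : PySem.Dict String Int × List Char × List Char) (c : Char) :
    PySem.Dict String Int × List Char × List Char :=
  let (counts, elem, num) := st
  if PySem.Chars.isupper c then
    ((if elem.isEmpty then counts else bAdd coef counts elem num), [c], [])
  else if PySem.Chars.islower c && elem.length == 1 && num.isEmpty then
    (counts, elem ++ [c], num)
  else if PySem.Chars.isdigit c && !elem.isEmpty then
    (counts, elem, num ++ [c])
  else
    ((if elem.isEmpty then counts else bAdd coef counts elem num), [], [])

def bCountSide (side : List Char) : PySem.Dict String Int :=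
  (PySem.Chars.splitOn side ['+']).foldl (fun counts term =>
    let term := PySem.Chars.replace (PySem.Chars.strip term) [' '] []
    let body := term.dropWhile PySem.Chars.isdigit                  -- term.lstrip("0123456789")
    let coef := bInt (term.take (term.length - body.length))        -- int(term[:len-len(body)] or "1")
    let st := body.foldl (bStep coef) (counts, [], [])
    if st.2.1.isEmpty then st.1 else bAdd coef st.1 st.2.1 st.2.2)  -- the trailing "if elem: _add(...)"
    PySem.Dict.empty

def check_reaction_alt (line : String) : Bool × (List (String × Int × Int × Int)) :=
  let parts := PySem.Chars.splitOn line.toList ('-' :: '>' :: [])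
  -- the two-variable unpacking of the split: exactly two pieces, anything else raises (outside Pre_)
  if parts.length == 2 then
    let left := parts.headD []
    let right := parts.tail.headD []
    let lc := bCountSide left
    let rc := bCountSide right
    if pyDictEq lc rc then (true, [])
    else
      let elems := PySem.List.dedup (lc.keys ++ rc.keys)       -- list(dict.fromkeys(list(lc)+list(rc)))
      let diffs : PySem.Dict String (Int × Int × Int) :=       -- the dict comprehension
        PySem.Dict.ofList ((elems.filter (fun e => lc.getD e 0 != rc.getD e 0)).map
          (fun e => (e, lc.getD e 0, rc.getD e 0, lc.getD e 0 - rc.getD e 0)))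
      (false, diffs.items)
  else (false, [])

-- ===== PRECONDITION & SPEC =====
-- Pre_ excludes exactly the lines on which the two-variable unpacking of the split raises
-- ValueError (the arrow separator occurs zero or several times); A returns no value there,
-- and B raises there too.
def Pre_check_reaction (line : String) : Prop :=
  (PySem.Chars.splitOn line.toList ('-' :: '>' :: [])).length = 2
instance (line : String) : Decidable (Pre_check_reaction line) := by
  unfold Pre_check_reaction; infer_instance

def pvWitness_check_reaction : String := "H2 + O -> H2O"

def Spec_check_reaction (line : String) (out : Bool × (List (String × Int × Int × Int))) : Prop :=
  out = check_reaction_alt line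
instance (line : String) (out : Bool × (List (String × Int × Int × Int))) :
    Decidable (Spec_check_reaction line out) := by unfold Spec_check_reaction; infer_instance

-- ===== CLAIM (what is proved, stated in full; the proofs are below) =====
def Claim_equal_check_reaction : Prop :=
  ∀ (line : String), Dom_check_reaction line → Pre_check_reaction line →
    Spec_check_reaction line (check_reaction line)

-- ===== LEMMAS AND PROOFS =====

theorem aDigits_eq (cs : List Char) :
    aDigits cs = (cs.takeWhile PySem.Chars.isdigit, cs.dropWhile PySem.Chars.isdigit) := by
  induction cs with
  | nil => simp [aDigits]
  | cons c cs ih =>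
    simp only [aDigits, List.takeWhile, List.dropWhile, ih]
    split <;> simp_all

-- character classes used by the parsers are mutually exclusive
theorem pvUpper_excl {c : Char} (h : PySem.Chars.isupper c = true) :
    PySem.Chars.isdigit c = false ∧ PySem.Chars.islower c = false := by
  simp [PySem.Chars.isupper, PySem.Chars.isdigit, PySem.Chars.islower,
    Char.le_def, UInt32.le_iff_toNat_le] at h ⊢
  omega

theorem pvDigit_excl {c : Char} (h : PySem.Chars.isdigit c = true) :
    PySem.Chars.isupper c = false ∧ PySem.Chars.islower c = false := by
  simp [PySem.Chars.isupper, PySem.Chars.isdigit, PySem.Chars.islower,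
    Char.le_def, UInt32.le_iff_toNat_le] at h ⊢
  omega

-- "if elem: _add(..)" at the end of B's loop
def bFin (coef : Int) (st : PySem.Dict String Int × List Char × List Char) :
    PySem.Dict String Int :=
  if st.2.1.isEmpty then st.1 else bAdd coef st.1 st.2.1 st.2.2

-- a run of digits only grows the pending digit-run
theorem bFold_digits (coef : Int) (ds : List Char) (hall : ∀ d ∈ ds, PySem.Chars.isdigit d = true) :
    ∀ (counts : PySem.Dict String Int) (elem num : List Char), elem ≠ [] →
      ds.foldl (bStep coef) (counts, elem, num) = (counts, elem, num ++ ds) := by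
  induction ds with
  | nil => intro counts elem num _; simp
  | cons d ds ih =>
    intro counts elem num hne
    have hd : PySem.Chars.isdigit d = true := hall d (by simp)
    have step : bStep coef (counts, elem, num) d = (counts, elem, num ++ [d]) := by
      simp [bStep, (pvDigit_excl hd).1, (pvDigit_excl hd).2, hd,
        List.isEmpty_iff, hne]
    rw [List.foldl_cons, step, ih (fun x hx => hall x (by simp [hx])) _ _ _ hne]
    simp

-- flushing a pending token early (at a boundary char) gives the same final dict
theorem bFold_flush (coef : Int) (rest : List Char) (counts : PySem.Dict String Int)
    (elem num : List Char) (hne : elem ≠ [])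
    (hb : ∀ h, rest.head? = some h → PySem.Chars.isdigit h = false ∧
      (PySem.Chars.islower h = true → ¬(elem.length = 1 ∧ num = []))) :
    bFin coef (rest.foldl (bStep coef) (counts, elem, num)) =
      bFin coef (rest.foldl (bStep coef) (bAdd coef counts elem num, [], [])) := by
  cases rest with
  | nil =>
    simp [bFin, List.isEmpty_iff, hne]
  | cons h t =>
    obtain ⟨hd, hl⟩ := hb h rfl
    have key : bStep coef (counts, elem, num) h =
        bStep coef (bAdd coef counts elem num, [], []) h := by
      by_cases hu : PySem.Chars.isupper h = true
      · simp [bStep, hu, List.isEmpty_iff, hne]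
      · by_cases hlo : PySem.Chars.islower h = true
        · have h1 : (elem.length == 1 && num.isEmpty) = false := by
            by_cases h' : elem.length = 1
            · have hn : num ≠ [] := fun hnil => (hl hlo) ⟨h', hnil⟩
              simp [hn]
            · simp [h']
          simp [bStep, hu, hlo, hd, h1, List.isEmpty_iff, hne]
        · simp [bStep, hu, hlo, hd, List.isEmpty_iff, hne]
    rw [List.foldl_cons, List.foldl_cons, key]

-- B's forward accumulator computes exactly A's index scan
theorem aScan_eq (coef : Int) (cs : List Char) (counts : PySem.Dict String Int) :
    bFin coef (cs.foldl (bStep coef) (counts, [], [])) = aScan coef cs counts := by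
  fun_induction aScan coef cs counts with
  | case1 counts => simp [bFin]
  | case2 c counts hu d cs' hl p ih =>
    simp only [p, aDigits_eq] at ih ⊢
    rw [← ih]
    have hud : PySem.Chars.isupper d = false := by
      by_contra hc
      exact absurd hl (by simp [(pvUpper_excl (by simpa using hc)).2])
    have step_c : bStep coef (counts, [], []) c = (counts, [c], []) := by
      simp [bStep, hu]
    have step_d : bStep coef (counts, [c], []) d = (counts, [c, d], []) := by
      simp [bStep, hud, hl]
    rw [List.foldl_cons, step_c, List.foldl_cons, step_d]
    conv_lhs => rw [← List.takeWhile_append_dropWhile (p := PySem.Chars.isdigit) (l := cs')]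
    rw [List.foldl_append,
      bFold_digits coef _ (fun x hx => List.mem_takeWhile_imp hx) counts [c, d] [] (by simp),
      List.nil_append,
      bFold_flush coef _ counts [c, d] _ (by simp)
        (fun h hh => ⟨by
            have := List.head?_dropWhile_not PySem.Chars.isdigit cs'
            rw [hh] at this; exact this,
          fun _ hcon => by simp at hcon⟩)]
    rfl
  | case3 c counts hu d cs' hl p ih =>
    simp only [p, aDigits_eq] at ih ⊢
    rw [← ih]
    have step_c : bStep coef (counts, [], []) c = (counts, [c], []) := by
      simp [bStep, hu]
    rw [List.foldl_cons, step_c]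
    conv_lhs => rw [← List.takeWhile_append_dropWhile (p := PySem.Chars.isdigit) (l := d :: cs')]
    rw [List.foldl_append,
      bFold_digits coef _ (fun x hx => List.mem_takeWhile_imp hx) counts [c] [] (by simp),
      List.nil_append,
      bFold_flush coef _ counts [c] _ (by simp)
        (fun h hh => ⟨by
            have := List.head?_dropWhile_not PySem.Chars.isdigit (d :: cs')
            rw [hh] at this; exact this,
          fun hlo hcon => by
            -- a mergeable lowercase head would force an empty digit run,
            -- i.e. the head is d itself — but d is not lowercase
            obtain ⟨-, hnum⟩ := hcon
            have hdd : PySem.Chars.isdigit d = false := by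
              by_contra hc
              simp [eq_true_of_ne_false (by simpa using hc)] at hnum
            rw [List.dropWhile_cons, hdd] at hh
            simp at hh
            rw [hh] at hl
            exact hl hlo⟩)]
    rfl
  | case4 c counts hu =>
    have step : bStep coef (counts, [], []) c = (counts, [c], []) := by
      simp [bStep, hu]
    simp [List.foldl_cons, step, bFin, bAdd, bInt, aInt]
  | case5 c cs counts hu ih =>
    have step : bStep coef (counts, [], []) c = (counts, [], []) := by
      by_cases hl : PySem.Chars.islower c = true
      · simp [bStep, hu, hl]
      · by_cases hd : PySem.Chars.isdigit c = true
        · simp [bStep, hu, hd, hl]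
        · simp [bStep, hu, hd, hl]
    rw [List.foldl_cons, step, ih]

theorem take_len_sub_eq_takeWhile (p : Char → Bool) (l : List Char) :
    l.take (l.length - (l.dropWhile p).length) = l.takeWhile p := by
  have hlen : l.length - (l.dropWhile p).length = (l.takeWhile p).length := by
    have h := congrArg List.length (List.takeWhile_append_dropWhile (p := p) (l := l))
    simp only [List.length_append] at h
    omega
  rw [hlen]
  calc l.take (l.takeWhile p).length
      = (l.takeWhile p ++ l.dropWhile p).take (l.takeWhile p).length := by
        rw [List.takeWhile_append_dropWhile]
    _ = l.takeWhile p := List.take_left' rfl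

-- the two count_side implementations build the very same dict
theorem countSide_eq (side : List Char) : aCountSide side = bCountSide side := by
  unfold aCountSide bCountSide
  congr 1
  funext counts term
  dsimp only
  rw [aDigits_eq, take_len_sub_eq_takeWhile]
  show aScan (aInt _) _ counts = bFin (bInt _) (List.foldl _ (counts, [], []) _)
  rw [aScan_eq]
  rfl

-- A's diffs loop and B's dict comprehension produce the same items
theorem pvDiffs_eq (lc rc : PySem.Dict String Int) :
    ((PySem.Set.union (PySem.Set.ofList lc.keys) (PySem.Set.ofList rc.keys)).foldl
      (fun (diffs : PySem.Dict String (Int × Int × Int)) e =>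
        if lc.getD e 0 != rc.getD e 0 then
          diffs.insert e (lc.getD e 0, rc.getD e 0, lc.getD e 0 - rc.getD e 0)
        else diffs)
      PySem.Dict.empty).items
    = (PySem.Dict.ofList (((PySem.List.dedup (lc.keys ++ rc.keys)).filter
        (fun e => lc.getD e 0 != rc.getD e 0)).map
        (fun e => (e, lc.getD e 0, rc.getD e 0, lc.getD e 0 - rc.getD e 0)))).items := by
  have hU : PySem.Set.union (PySem.Set.ofList lc.keys) (PySem.Set.ofList rc.keys)
      = PySem.List.dedup (lc.keys ++ rc.keys) := by
    rw [PySem.List.dedup_eq_ofList, PySem.Set.ofList_append]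
    show (PySem.Set.ofList lc.keys).update (PySem.Set.ofList rc.keys) = _
    rw [PySem.Set.update_eq_append_filter, PySem.Set.update_eq_append_filter,
      PySem.Set.ofList_ofList]
  rw [hU]
  have hE : (PySem.List.dedup (lc.keys ++ rc.keys)).Nodup := by
    rw [PySem.List.dedup_eq_ofList]; exact PySem.Set.nodup_ofList _
  have hEf : ((PySem.List.dedup (lc.keys ++ rc.keys)).filter
      (fun e => lc.getD e 0 != rc.getD e 0)).Nodup := hE.filter _
  rw [PySem.List.foldl_if_eq_foldl_filter
    (fun e => lc.getD e 0 != rc.getD e 0)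
    (fun (diffs : PySem.Dict String (Int × Int × Int)) e =>
      diffs.insert e (lc.getD e 0, rc.getD e 0, lc.getD e 0 - rc.getD e 0))]
  rw [PySem.Dict.items_foldl_insert_fresh _ (fun e => e)
    (fun e => (lc.getD e 0, rc.getD e 0, lc.getD e 0 - rc.getD e 0)) _
    (fun a _ => PySem.Dict.contains_empty a) (by simpa using hEf)]
  show _ = (PySem.Dict.empty.update _).items
  rw [show (PySem.Dict.update (PySem.Dict.empty) (((PySem.List.dedup (lc.keys ++ rc.keys)).filter
        (fun e => lc.getD e 0 != rc.getD e 0)).map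
        (fun e => (e, lc.getD e 0, rc.getD e 0, lc.getD e 0 - rc.getD e 0)))) =
    (((PySem.List.dedup (lc.keys ++ rc.keys)).filter
        (fun e => lc.getD e 0 != rc.getD e 0)).map
        (fun e => (e, lc.getD e 0, rc.getD e 0, lc.getD e 0 - rc.getD e 0))).foldl
      (fun acc p => acc.insert p.1 p.2) PySem.Dict.empty from rfl]
  have hB := PySem.Dict.items_foldl_insert_fresh
    (l := ((PySem.List.dedup (lc.keys ++ rc.keys)).filter
      (fun e => lc.getD e 0 != rc.getD e 0)).map
      (fun e => (e, lc.getD e 0, rc.getD e 0, lc.getD e 0 - rc.getD e 0)))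
    (k := fun (p : String × Int × Int × Int) => p.1) (v := fun p => p.2)
    (d := PySem.Dict.empty)
    (fun a _ => PySem.Dict.contains_empty a.1)
    (by simpa [List.map_map, Function.comp_def] using hEf)
  beta_reduce at hB
  rw [hB]
  simp

-- ===== VERDICT (by name: the statement is the Claim_ definition above) =====
theorem check_reaction_spec : Claim_equal_check_reaction := by
  intro line hdom hpre
  unfold Spec_check_reaction check_reaction check_reaction_alt
  unfold Pre_check_reaction at hpre
  rcases h : PySem.Chars.splitOn line.toList ('-' :: '>' :: []) with _ | ⟨l, _ | ⟨r, _ | ⟨x, rest⟩⟩⟩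
  · rw [h] at hpre; simp at hpre
  · rw [h] at hpre; simp at hpre
  · show (_, _) = _
    rw [countSide_eq l, countSide_eq r]
    simp only [List.length_cons, List.length_nil, List.headD_cons, List.tail_cons]
    by_cases hb : pyDictEq (bCountSide l) (bCountSide r) = true
    · simp [hb]
      rfl
    · rw [Bool.not_eq_true] at hb
      simp only [hb, Bool.false_eq_true, if_false]
      exact congrArg (Prod.mk false) (pvDiffs_eq (bCountSide l) (bCountSide r))
  · rw [h] at hpre; simp at hpre
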